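-- pv_equiv track=rewrite | github.com/Hoonys101/economics | check_inheritance.py | get_inheritance_depth
-- ===== SOURCE A (Python) =====
-- def get_inheritance_depth(class_name, classes, depth=1):
--     if class_name not in classes:
--         return depth
--     parents = classes[class_name]
--     if not parents:
--         return depth
--     max_parent_depth = 0
--     for parent in parents:
--         max_parent_depth = max(max_parent_depth, get_inheritance_depth(parent, classes, depth + 1))
--     return max_parent_depth
-- ===== SOURCE B (Python) =====
-- def get_inheritance_depth(class_name, classes, depth=1):
--     # bottom-up value iteration (longest-chain DP) instead of A's exponential recursion
--     L = {}
--     for _ in range(len(classes) + 1):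
--         L = {k: (0 if not ps else 1 + max(L.get(p, 0) for p in ps))
--              for k, ps in classes.items()}
--     if class_name not in classes or not classes[class_name]:
--         return depth
--     return max(0, depth + L[class_name])
-- ===== Notes on version B (the rewrite author's own statement) =====
-- stated objective: faster
-- what changed: Replaced A's exponential top-down recursion (re-exploring every inheritance path, exponential on diamond hierarchies) by a bottom-up value-iteration DP that computes the longest chain above every class in len(classes)+1 relaxation rounds and then reads off the answer in one lookup.
import Mathlib
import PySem

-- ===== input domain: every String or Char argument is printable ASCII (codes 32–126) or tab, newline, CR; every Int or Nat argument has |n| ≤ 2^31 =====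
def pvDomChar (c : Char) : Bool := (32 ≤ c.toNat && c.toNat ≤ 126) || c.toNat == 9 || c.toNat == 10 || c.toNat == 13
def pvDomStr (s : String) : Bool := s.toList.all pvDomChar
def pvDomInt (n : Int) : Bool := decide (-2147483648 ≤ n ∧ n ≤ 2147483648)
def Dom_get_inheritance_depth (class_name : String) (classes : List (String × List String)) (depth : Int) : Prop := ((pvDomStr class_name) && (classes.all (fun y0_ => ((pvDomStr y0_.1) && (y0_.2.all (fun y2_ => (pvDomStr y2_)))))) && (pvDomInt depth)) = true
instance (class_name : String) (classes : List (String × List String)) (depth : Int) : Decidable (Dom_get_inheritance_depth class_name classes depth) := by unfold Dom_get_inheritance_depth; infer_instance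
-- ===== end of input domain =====

-- B replaces A's exponential recursion by a bottom-up value-iteration DP (same value on every input where A terminates).

-- ===== PORT A =====
-- Literal transliteration of A's recursion; the Nat argument is a fuel/totality
-- guard only (fuel classes.length+1 is never exhausted on inputs satisfying Pre_).
def pvDepthA (classes : List (String × List String)) : Nat → String → Int → Int
  | 0, _, depth => depth
  | f + 1, class_name, depth =>
    match List.lookup class_name classes with
    | none => depth                                   -- class_name not in classes
    | some parents =>
      if parents = [] then depth                      -- if not parents
      else parents.foldl (fun m p => max m (pvDepthA classes f p (depth + 1))) 0

def get_inheritance_depth (class_name : String) (classes : List (String × List String)) (depth : Int) : Int :=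
  pvDepthA classes (classes.length + 1) class_name depth

-- ===== PORT B =====
-- One relaxation round: L' = {k: (0 if not ps else 1 + max(L.get(p, 0) for p in ps)) for k, ps in classes.items()}
def pvStepB (classes : List (String × List String)) (L : List (String × Int)) : List (String × Int) :=
  classes.map (fun kp =>
    (kp.1, if kp.2 = [] then 0
           else 1 + ((PySem.List.max? (kp.2.map (fun p => (List.lookup p L).getD 0)) (fun y => y)).getD 0)))

-- L starts as {} and is re-built len(classes)+1 times
def pvIterB (classes : List (String × List String)) : Nat → List (String × Int)
  | 0 => []
  | k + 1 => pvStepB classes (pvIterB classes k)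

def get_inheritance_depth_alt (class_name : String) (classes : List (String × List String)) (depth : Int) : Int :=
  let L := pvIterB classes (classes.length + 1)
  match List.lookup class_name classes with
  | none => depth
  | some parents =>
    if parents = [] then depth
    else max 0 (depth + (List.lookup class_name L).getD 0)

-- ===== PRECONDITION & SPEC =====
-- the k-step parent frontier of S: all endpoints of k-step inheritance paths starting in S
def pvStepF (classes : List (String × List String)) (S : List String) : List String :=
  S.flatMap (fun c => (List.lookup c classes).getD [])

def pvFrontier (classes : List (String × List String)) : Nat → List String → List String
  | 0, S => S
  | k + 1, S => pvFrontier classes k (pvStepF classes S)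

-- Pre_ excludes exactly the inputs on which the Python A raises RecursionError:
-- those where an infinite inheritance path starts at class_name, i.e. the parent
-- frontier of {class_name} survives classes.length+1 steps (by pigeonhole such a
-- path revisits a key, so it reaches a cycle and A never terminates).
def Pre_get_inheritance_depth (class_name : String) (classes : List (String × List String)) (depth : Int) : Prop :=
  pvFrontier classes (classes.length + 1) [class_name] = []
instance (class_name : String) (classes : List (String × List String)) (depth : Int) : Decidable (Pre_get_inheritance_depth class_name classes depth) := by unfold Pre_get_inheritance_depth; infer_instance

def pvWitness_get_inheritance_depth : String × (List (String × List String)) × Int :=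
  ("B", [("B", ["A"]), ("A", [])], 1)

def Spec_get_inheritance_depth (class_name : String) (classes : List (String × List String)) (depth : Int) (out : Int) : Prop := out = get_inheritance_depth_alt class_name classes depth
instance (class_name : String) (classes : List (String × List String)) (depth : Int) (out : Int) : Decidable (Spec_get_inheritance_depth class_name classes depth out) := by unfold Spec_get_inheritance_depth; infer_instance

-- ===== CLAIM (what is proved, stated in full; the proofs are below) =====
def Claim_equal_get_inheritance_depth : Prop := ∀ (class_name : String) (classes : List (String × List String)) (depth : Int), Dom_get_inheritance_depth class_name classes depth → Pre_get_inheritance_depth class_name classes depth → Spec_get_inheritance_depth class_name classes depth (get_inheritance_depth class_name classes depth)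

-- ===== LEMMAS AND PROOFS =====

-- value of class c after k relaxation rounds
def pvLB (classes : List (String × List String)) (k : Nat) (c : String) : Int :=
  (List.lookup c (pvIterB classes k)).getD 0

theorem pv_lookup_map (l : List (String × List String)) (c : String) (F : List String → Int) :
    List.lookup c (l.map (fun kp => (kp.1, F kp.2))) = (l.lookup c).map F := by
  induction l with
  | nil => rfl
  | cons kp t ih =>
    obtain ⟨k, v⟩ := kp
    simp only [List.map_cons, List.lookup]
    cases h : (c == k) <;> simp [h, ih]

theorem pvLB_succ (classes : List (String × List String)) (k : Nat) (c : String) :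
    pvLB classes (k + 1) c =
      match List.lookup c classes with
      | none => 0
      | some ps => if ps = [] then 0
          else 1 + ((PySem.List.max? (ps.map (fun p => pvLB classes k p)) (fun y => y)).getD 0) := by
  have h1 : List.lookup c (pvIterB classes (k + 1)) =
      (List.lookup c classes).map (fun ps => if ps = [] then 0
        else 1 + ((PySem.List.max? (ps.map (fun p => (List.lookup p (pvIterB classes k)).getD 0)) (fun y => y)).getD 0)) :=
    pv_lookup_map classes c (fun ps => if ps = [] then 0
      else 1 + ((PySem.List.max? (ps.map (fun p => (List.lookup p (pvIterB classes k)).getD 0)) (fun y => y)).getD 0))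
  unfold pvLB
  rw [h1]
  cases List.lookup c classes with
  | none => rfl
  | some ps => rfl

theorem pvLB_leaf (classes : List (String × List String)) (c : String)
    (h : (List.lookup c classes).getD [] = []) (k : Nat) : pvLB classes k c = 0 := by
  cases k with
  | zero => rfl
  | succ k =>
    rw [pvLB_succ]
    cases hc : List.lookup c classes with
    | none => rfl
    | some ps =>
      rw [hc] at h
      simp only [Option.getD_some] at h
      show (if ps = [] then (0:Int) else _) = 0
      rw [if_pos h]

theorem pv_frontier_append (classes : List (String × List String)) (k : Nat) :
    ∀ S T, pvFrontier classes k (S ++ T) = pvFrontier classes k S ++ pvFrontier classes k T := by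
  induction k with
  | zero => intro S T; rfl
  | succ k ih =>
    intro S T
    show pvFrontier classes k (pvStepF classes (S ++ T)) = _
    rw [show pvStepF classes (S ++ T) = pvStepF classes S ++ pvStepF classes T by
      simp [pvStepF]]
    exact ih _ _

theorem pv_frontier_mem_empty (classes : List (String × List String)) (k : Nat)
    (S : List String) (h : pvFrontier classes k S = []) :
    ∀ p ∈ S, pvFrontier classes k [p] = [] := by
  induction S with
  | nil => simp
  | cons a T ih =>
    intro p hp
    have h' : pvFrontier classes k ([a] ++ T) = [] := by simpa using h
    rw [pv_frontier_append] at h'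
    rcases List.append_eq_nil_iff.mp h' with ⟨h1, h2⟩
    rcases List.mem_cons.mp hp with h3 | h3
    · subst h3; exact h1
    · exact ih h2 p h3

theorem pv_frontier_parents (classes : List (String × List String)) (k : Nat)
    (c : String) (ps : List String) (hc : List.lookup c classes = some ps)
    (h : pvFrontier classes (k + 1) [c] = []) :
    ∀ p ∈ ps, pvFrontier classes k [p] = [] := by
  have hstep : pvStepF classes [c] = ps := by simp [pvStepF, hc]
  have h2 : pvFrontier classes k ps = [] := by rw [← hstep]; exact h
  exact pv_frontier_mem_empty classes k ps h2

theorem pv_frontier_pos (classes : List (String × List String)) (c : String)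
    (h : pvFrontier classes 0 [c] = []) : False := by
  simp [pvFrontier] at h

-- fold with running max = fold max over the mapped list
theorem pv_foldl_max_map (g : String → Int) :
    ∀ (ps : List String) (a : Int),
      ps.foldl (fun m p => max m (g p)) a = (ps.map g).foldl max a := by
  intro ps
  induction ps with
  | nil => intro a; rfl
  | cons q t ih => intro a; simp [List.foldl_cons, ih]

theorem pv_seed_le_foldl_max : ∀ (xs : List Int) (a : Int), a ≤ xs.foldl max a := by
  intro xs
  induction xs with
  | nil => intro a; simp
  | cons x t ih => intro a; exact le_trans (le_max_left a x) (ih (max a x))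

-- congruence of clipped max-folds under pointwise clipped equality
theorem pv_clipfold (g h : String → Int) :
    ∀ (ps : List String) (a b : Int), max 0 a = max 0 b →
      (∀ p ∈ ps, max 0 (g p) = max 0 (h p)) →
      max 0 ((ps.map g).foldl max a) = max 0 ((ps.map h).foldl max b) := by
  intro ps
  induction ps with
  | nil => intro a b hab _; simpa using hab
  | cons q t ih =>
    intro a b hab hmem
    simp only [List.map_cons, List.foldl_cons]
    apply ih
    · have hq := hmem q (by simp)
      omega
    · intro p hp; exact hmem p (by simp [hp])

-- pulling a constant shift out of a max-fold under an outer clip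
theorem pv_shiftfold (x : Int) (l : String → Int) :
    ∀ (qs : List String) (a b : Int), max 0 a = max 0 (x + b) →
      max 0 ((qs.map (fun p => x + l p)).foldl max a) = max 0 (x + (qs.map l).foldl max b) := by
  intro qs
  induction qs with
  | nil => intro a b hab; simpa using hab
  | cons q t ih =>
    intro a b hab
    simp only [List.map_cons, List.foldl_cons]
    apply ih
    omega

-- A's fuelled recursion computes B's closed form whenever the frontier from c dies within f steps
theorem pv_key (classes : List (String × List String)) :
    ∀ (f : Nat) (c : String) (d : Int), pvFrontier classes f [c] = [] →
      pvDepthA classes f c d =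
        match List.lookup c classes with
        | none => d
        | some ps => if ps = [] then d else max 0 (d + pvLB classes (f - 1) c) := by
  intro f
  induction f with
  | zero => intro c d h; exact absurd h (by simp [pvFrontier])
  | succ f ih =>
    intro c d h
    cases hc : List.lookup c classes with
    | none => simp [pvDepthA, hc]
    | some ps =>
      by_cases hps : ps = []
      · simp [pvDepthA, hc, hps]
      · have hpar := pv_frontier_parents classes f c ps hc h
        obtain ⟨q, qs, rfl⟩ := List.exists_cons_of_ne_nil hps
        cases f with
        | zero => exact absurd (hpar q (by simp)) (pv_frontier_pos classes q)
        | succ f' =>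
          have lhs1 : pvDepthA classes (f' + 1 + 1) c d =
              ((q :: qs).map (fun p => pvDepthA classes (f' + 1) p (d + 1))).foldl max 0 := by
            simp only [pvDepthA, hc]
            rw [if_neg (by simp)]
            exact pv_foldl_max_map _ _ _
          -- pointwise clipped description of each parent's value
          have hpt : ∀ p ∈ q :: qs,
              max 0 (pvDepthA classes (f' + 1) p (d + 1)) =
              max 0 ((d + 1) + pvLB classes f' p) := by
            intro p hp
            rw [ih p (d + 1) (hpar p hp)]
            cases hpc : List.lookup p classes with
            | none =>
              show max 0 (d + 1) = max 0 (d + 1 + pvLB classes f' p)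
              rw [pvLB_leaf classes p (by simp [hpc]) f']
              simp
            | some pps =>
              show max 0 (if pps = [] then d + 1 else max 0 (d + 1 + pvLB classes (f' + 1 - 1) p)) =
                max 0 (d + 1 + pvLB classes f' p)
              by_cases hpp : pps = []
              · rw [if_pos hpp, pvLB_leaf classes p (by simp [hpc, hpp]) f']
                simp
              · rw [if_neg hpp]
                have hred : f' + 1 - 1 = f' := rfl
                rw [hred, ← max_assoc, max_self]
          -- target side: unfold one round of the DP
          have rhs1 : pvLB classes (f' + 1) c =
              1 + ((qs.map (fun p => pvLB classes f' p)).foldl max (pvLB classes f' q)) := by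
            rw [pvLB_succ, hc]
            show (if (q :: qs) = ([] : List String) then (0:Int)
                else 1 + ((PySem.List.max? ((q :: qs).map (fun p => pvLB classes f' p)) (fun y => y)).getD 0)) = _
            rw [if_neg (by simp)]
            simp only [List.map_cons]
            rw [PySem.List.max?_id_cons]
            rfl
          rw [lhs1]
          have hnn : (0 : Int) ≤ ((q :: qs).map (fun p => pvDepthA classes (f' + 1) p (d + 1))).foldl max 0 :=
            pv_seed_le_foldl_max _ 0
          rw [(max_eq_right hnn).symm]
          rw [pv_clipfold (fun p => pvDepthA classes (f' + 1) p (d + 1))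
            (fun p => (d + 1) + pvLB classes f' p) (q :: qs) 0 0 rfl hpt]
          simp only [List.map_cons, List.foldl_cons]
          rw [pv_shiftfold (d + 1) (pvLB classes f') qs
            (max 0 (d + 1 + pvLB classes f' q)) (pvLB classes f' q) (by rw [← max_assoc, max_self])]
          show max 0 (d + 1 + (qs.map (fun p => pvLB classes f' p)).foldl max (pvLB classes f' q)) =
            (if (q :: qs) = ([] : List String) then d else max 0 (d + pvLB classes (f' + 1) c))
          rw [if_neg (by simp), rhs1]
          omega

-- the DP value of c is stable from round f on, once the frontier from c dies within f+1 steps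
theorem pv_stable (classes : List (String × List String)) :
    ∀ (f : Nat) (c : String), pvFrontier classes (f + 1) [c] = [] →
      ∀ m, f ≤ m → pvLB classes m c = pvLB classes f c := by
  intro f
  induction f with
  | zero =>
    intro c h m _
    have hleaf : (List.lookup c classes).getD [] = [] := by
      have h1 : pvStepF classes [c] = [] := by simpa [pvFrontier] using h
      simpa [pvStepF] using h1
    rw [pvLB_leaf classes c hleaf m, pvLB_leaf classes c hleaf 0]
  | succ f ih =>
    intro c h m hm
    cases hc : List.lookup c classes with
    | none => rw [pvLB_leaf classes c (by simp [hc]) m, pvLB_leaf classes c (by simp [hc]) (f + 1)]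
    | some ps =>
      by_cases hps : ps = []
      · rw [pvLB_leaf classes c (by simp [hc, hps]) m, pvLB_leaf classes c (by simp [hc, hps]) (f + 1)]
      · have hpar := pv_frontier_parents classes (f + 1) c ps hc h
        obtain ⟨m', rfl⟩ : ∃ m', m = m' + 1 := ⟨m - 1, by omega⟩
        have hmap : ps.map (fun p => pvLB classes m' p) = ps.map (fun p => pvLB classes f p) :=
          List.map_congr_left (fun p hp => ih p (hpar p hp) m' (by omega))
        rw [pvLB_succ, pvLB_succ, hc]
        show (if ps = [] then (0:Int)
            else 1 + ((PySem.List.max? (ps.map (fun p => pvLB classes m' p)) (fun y => y)).getD 0)) =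
          (if ps = [] then (0:Int)
            else 1 + ((PySem.List.max? (ps.map (fun p => pvLB classes f p)) (fun y => y)).getD 0))
        rw [hmap]

-- ===== VERDICT (by name: the statement is the Claim_ definition above) =====
theorem get_inheritance_depth_spec : Claim_equal_get_inheritance_depth := by
  intro class_name classes depth _ hpre
  show get_inheritance_depth class_name classes depth = get_inheritance_depth_alt class_name classes depth
  unfold get_inheritance_depth get_inheritance_depth_alt
  rw [pv_key classes (classes.length + 1) class_name depth hpre]
  have hstab : pvLB classes (classes.length + 1) class_name = pvLB classes classes.length class_name :=
    pv_stable classes classes.length class_name hpre (classes.length + 1) (by omega)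
  cases hc : List.lookup class_name classes with
  | none => rfl
  | some ps =>
    show (if ps = [] then depth else max 0 (depth + pvLB classes (classes.length + 1 - 1) class_name)) =
      (if ps = [] then depth else max 0 (depth + (List.lookup class_name (pvIterB classes (classes.length + 1))).getD 0))
    by_cases hps : ps = []
    · rw [if_pos hps, if_pos hps]
    · rw [if_neg hps, if_neg hps]
      rw [show classes.length + 1 - 1 = classes.length from rfl]
      rw [show (List.lookup class_name (pvIterB classes (classes.length + 1))).getD 0
          = pvLB classes (classes.length + 1) class_name from rfl, hstab]
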